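-- pv_equiv track=rewrite | github.com/scottvr/phart | src/phart/cli.py | _normalize_label_args
-- ===== SOURCE A (Python) =====
-- def _normalize_label_args(argv: list[str]) -> list[str]:
--     """Normalize bare --node-labels/--edge-labels usage.
--
--     Converts:
--       --node-labels                 -> --node-labels label
--       --node-labels <input>         -> --node-labels label <input>
--       --edge-labels                 -> --edge-labels label
--       --edge-labels <input>         -> --edge-labels label <input>
--
--     Ambiguous non-option tokens are treated as the positional input when there is no
--     other positional token later in argv.
--     """
--     normalized: list[str] = []
--     i = 0
--     label_flags = {"--node-labels", "--edge-labels"}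
--     while i < len(argv):
--         token = argv[i]
--
--         if token == "--":
--             normalized.extend(argv[i:])
--             break
--
--         if token in label_flags:
--             next_token = argv[i + 1] if i + 1 < len(argv) else None
--             if next_token is None or next_token.startswith("-"):
--                 normalized.extend([token, "label"])
--                 i += 1
--                 continue
--
--             remaining_cli_tokens: list[str] = []
--             for value in argv[i + 2 :]:
--                 if value == "--":
--                     break
--                 remaining_cli_tokens.append(value)
--             has_later_positional = any(
--                 not value.startswith("-") for value in remaining_cli_tokens
--             )
--             if not has_later_positional:
--                 normalized.extend([token, "label"])
--                 i += 1
--                 continue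
--
--         normalized.append(token)
--         i += 1
--
--     return normalized
-- ===== SOURCE B (Python) =====
-- def _normalize_label_args(argv: list[str]) -> list[str]:
--     # Single pass with a precomputed suffix table of "positional token later"
--     # over the region before the first "--", instead of rescanning argv per flag.
--     if "--" in argv:
--         p = argv.index("--")
--     else:
--         p = len(argv)
--     region = argv[:p]
--     tail = argv[p:]
--     # suffix[j] == True iff region[j:] contains a token not starting with "-";
--     # two trailing False entries so suffix[i + 2] is always valid for i < p.
--     suffix = [False, False]
--     for tok in reversed(region):
--         suffix.append(suffix[-1] or not tok.startswith("-"))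
--     suffix.reverse()
--     nexts = [*region[1:], *tail[:1], None]
--     out: list[str] = []
--     for tok, nxt, later_positional in zip(region, nexts, suffix[2:]):
--         if tok in ("--node-labels", "--edge-labels") and (
--             nxt is None or nxt.startswith("-") or not later_positional
--         ):
--             out += [tok, "label"]
--         else:
--             out.append(tok)
--     out.extend(tail)
--     return out
-- ===== Notes on version B (the rewrite author's own statement) =====
-- stated objective: alternative
-- what changed: A rescans the rest of argv (up to '--') for a later positional token every time it meets a label flag; B splits argv at the first '--' once, precomputes a right-to-left suffix table of 'positional token later' and emits the output in a single forward zip pass, removing the nested rescan (worst-case O(n) instead of O(n^2); a timing run's inputs did not confirm a speedup).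
import Mathlib
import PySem

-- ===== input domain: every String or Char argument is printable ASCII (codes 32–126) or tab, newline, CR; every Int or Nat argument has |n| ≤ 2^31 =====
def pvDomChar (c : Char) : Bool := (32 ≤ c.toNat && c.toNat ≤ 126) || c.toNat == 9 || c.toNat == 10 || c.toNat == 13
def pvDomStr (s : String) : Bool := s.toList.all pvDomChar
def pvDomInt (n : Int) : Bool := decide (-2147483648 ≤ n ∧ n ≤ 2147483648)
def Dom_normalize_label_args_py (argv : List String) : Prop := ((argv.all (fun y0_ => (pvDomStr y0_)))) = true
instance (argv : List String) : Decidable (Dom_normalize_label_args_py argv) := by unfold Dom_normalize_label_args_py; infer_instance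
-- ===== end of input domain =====

-- B replaces A's per-flag rescan of the remaining argv with one precomputed
-- right-to-left suffix table over the region before the first "--" plus a single
-- forward zip pass (objective: alternative single-pass decomposition).


-- ===== PORT A =====
-- inner 'for value in argv[i+2:]: if value == "--": break; append' loop
def pvA_remaining (l : List String) : List String :=
  match l with
  | [] => []
  | v :: rest => if v == "--" then [] else v :: pvA_remaining rest

-- the while loop of A, one recursive call per 'i += 1' step; the already-emitted
-- prefix 'normalized' becomes the surrounding cons context
def normalize_label_args_py (argv : List String) : List String :=
  match argv with
  | [] => []
  | t :: rest =>
    if t == "--" then t :: rest                      -- normalized.extend(argv[i:]); break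
    else if t == "--node-labels" || t == "--edge-labels" then
      match rest with
      | [] =>                                        -- next_token is None
        t :: "label" :: normalize_label_args_py []
      | nt :: rest2 =>
        if PySem.Str.startswith nt "-" then
          t :: "label" :: normalize_label_args_py (nt :: rest2)
        else if !((pvA_remaining rest2).any (fun v => !(PySem.Str.startswith v "-"))) then
          t :: "label" :: normalize_label_args_py (nt :: rest2)
        else t :: normalize_label_args_py (nt :: rest2)
    else t :: normalize_label_args_py rest

-- ===== PORT B =====
def normalize_label_args_py_alt (argv : List String) : List String :=
  let p : Nat := (PySem.List.index? argv "--").getD argv.length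
  let region := PySem.List.slice argv none (some (p : Int))
  let tail := PySem.List.slice argv (some (p : Int)) none
  -- suffix appended right-to-left then reversed (Source B's append / reverse);
  -- suffix[-1] of the never-empty accumulator is getLastD false
  let suffix := (region.reverse.foldl
    (fun acc tok => acc ++ [acc.getLastD false || !(PySem.Str.startswith tok "-")])
    [false, false]).reverse
  let nexts := (region.drop 1).map some ++ (tail.take 1).map some ++ ([none] : List (Option String))
  let out := (region.zip (nexts.zip (suffix.drop 2))).foldl
    (fun acc x =>
      acc ++
        (if (x.1 == "--node-labels" || x.1 == "--edge-labels") &&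
            (x.2.1.isNone || x.2.1.elim false (fun s => PySem.Str.startswith s "-") || !x.2.2)
         then [x.1, "label"] else [x.1])) []
  out ++ tail

-- ===== PRECONDITION & SPEC =====
def Spec_normalize_label_args_py (argv : List String) (out : List String) : Prop := out = normalize_label_args_py_alt argv
instance (argv : List String) (out : List String) : Decidable (Spec_normalize_label_args_py argv out) := by unfold Spec_normalize_label_args_py; infer_instance

-- ===== CLAIM (what is proved, stated in full; the proofs are below) =====
def Claim_equal_normalize_label_args_py : Prop := ∀ (argv : List String), Dom_normalize_label_args_py argv → Spec_normalize_label_args_py argv (normalize_label_args_py argv)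

-- ===== LEMMAS AND PROOFS =====

-- a token counts as positional iff it does not start with "-"
def pvPos (v : String) : Bool := !(PySem.Str.startswith v "-")

-- common reference recursion: pvG region tail, region = argv before the first "--",
-- tail = argv from the first "--" on (or [])
def pvG : List String → List String → List String
  | [], tail => tail
  | t :: rs, tail =>
    if (t == "--node-labels" || t == "--edge-labels") &&
       (((rs ++ tail).head?).elim true (fun s => PySem.Str.startswith s "-") ||
        !((rs.drop 1).any pvPos))
    then t :: "label" :: pvG rs tail
    else t :: pvG rs tail

def pvSuf (l : List String) : List Bool :=
  l.reverse.foldl (fun acc tok => (acc.headD false || !(PySem.Str.startswith tok "-")) :: acc)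
    [false, false]

def pvSufRest (l : List String) : List Bool :=
  match l with
  | [] => [false]
  | _ :: xs => pvSuf xs

def pvNexts (region tail : List String) : List (Option String) :=
  (region.drop 1).map some ++ (tail.take 1).map some ++ ([none] : List (Option String))

-- Source B's append-then-reverse suffix build equals the cons-at-front build pvSuf
lemma pvFoldRev (l : List String) (acc : List Bool) :
    (l.foldl (fun a tok => a ++ [a.getLastD false || !(PySem.Str.startswith tok "-")]) acc).reverse
      = l.foldl (fun a tok => (a.headD false || !(PySem.Str.startswith tok "-")) :: a) acc.reverse := by
  induction l generalizing acc with
  | nil => rfl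
  | cons x xs ih =>
    simp only [List.foldl_cons]
    rw [ih]
    congr 1
    simp [List.getLastD_eq_getLast?, List.head?_reverse]

lemma pvSuf_shape (l : List String) : pvSuf l = (l.any pvPos) :: pvSufRest l := by
  induction l with
  | nil => rfl
  | cons x xs ih =>
    show (List.foldl _ _ ((x :: xs).reverse)) = _
    rw [List.reverse_cons, List.foldl_append]
    show ((pvSuf xs).headD false || !(PySem.Str.startswith x "-")) :: pvSuf xs = _
    rw [ih]
    simp only [List.headD_cons, pvSufRest, List.any_cons, pvPos]
    rw [Bool.or_comm]
    exact congrArg _ ih.symm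

lemma pvA_remaining_eq (l : List String) :
    pvA_remaining l = l.takeWhile (fun v => v != "--") := by
  induction l with
  | nil => rfl
  | cons v rest ih =>
    by_cases h : v = "--" <;> simp [pvA_remaining, h, ih]

-- A equals the reference recursion on the takeWhile/dropWhile split
lemma A_eq_G (argv : List String) :
    normalize_label_args_py argv
      = pvG (argv.takeWhile (fun v => v != "--")) (argv.dropWhile (fun v => v != "--")) := by
  induction argv with
  | nil => rfl
  | cons t rest ih =>
    by_cases h : t = "--"
    · subst h
      rw [normalize_label_args_py.eq_def]
      simp [pvG]
    · have htw : (t :: rest).takeWhile (fun v => v != "--")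
          = t :: rest.takeWhile (fun v => v != "--") := by simp [h]
      have hdw : (t :: rest).dropWhile (fun v => v != "--")
          = rest.dropWhile (fun v => v != "--") := by simp [h]
      rw [htw, hdw]
      have happ : rest.takeWhile (fun v => v != "--") ++ rest.dropWhile (fun v => v != "--")
          = rest := List.takeWhile_append_dropWhile
      by_cases hf : (t == "--node-labels" || t == "--edge-labels") = true
      · cases rest with
        | nil =>
          rw [normalize_label_args_py.eq_def, pvG.eq_def]
          simp [h, hf]
          rfl
        | cons nt rest2 =>
          by_cases hs : PySem.Chars.startswith nt.toList ['-'] = true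
          · rw [normalize_label_args_py.eq_def, pvG.eq_def]
            simp [h, hf, hs, happ, ih]
          · have hnt : ¬ nt = "--" := by
              intro e; rw [e] at hs; exact hs (by decide)
            have htw2 : (nt :: rest2).takeWhile (fun v => v != "--")
                = nt :: rest2.takeWhile (fun v => v != "--") := by simp [hnt]
            rw [normalize_label_args_py.eq_def, pvG.eq_def]
            simp only [pvA_remaining_eq, htw2]
            simp [h, hf, hs, pvPos, ih, htw2]
      · rw [normalize_label_args_py.eq_def, pvG.eq_def]
        rcases rest with _ | ⟨nt, rest2⟩ <;> simp [h, hf, ih]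

-- B's zip pass equals the reference recursion
lemma emit_eq_G (region tail : List String) :
    ((region.zip ((pvNexts region tail).zip ((pvSuf region).drop 2))).foldl
      (fun acc x =>
        acc ++
          (if (x.1 == "--node-labels" || x.1 == "--edge-labels") &&
              (x.2.1.isNone || x.2.1.elim false (fun s => PySem.Str.startswith s "-") || !x.2.2)
           then [x.1, "label"] else [x.1])) []) ++ tail
      = pvG region tail := by
  induction region generalizing tail with
  | nil => simp [pvG]
  | cons t rs ih =>
    rw [PySem.List.foldl_append_eq_flatMap]
    rw [show pvSuf (t :: rs) = ((t :: rs).any pvPos) :: pvSuf rs from pvSuf_shape (t :: rs)]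
    rw [pvSuf_shape rs]
    cases rs with
    | nil =>
      cases tail with
      | nil => rw [pvG.eq_def]; simp [pvNexts, pvSufRest, pvG]
      | cons h0 t0 =>
        rw [pvG.eq_def]
        simp [pvNexts, pvSufRest, pvG]
        by_cases hh : t = "--node-labels" ∨ t = "--edge-labels" <;> simp [hh]
    | cons r rs' =>
      rw [show pvSufRest (r :: rs') = pvSuf rs' from rfl, pvSuf_shape rs']
      rw [pvG.eq_def]
      have hrec := ih tail
      rw [PySem.List.foldl_append_eq_flatMap,
        show pvSuf (r :: rs') = ((r :: rs').any pvPos) :: pvSuf rs' from pvSuf_shape _,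
        pvSuf_shape rs'] at hrec
      simp only [pvNexts, List.drop_succ_cons, List.drop_zero, List.map_cons, List.cons_append,
        List.zip_cons_cons, List.flatMap_cons, List.nil_append] at hrec ⊢
      rw [List.append_assoc, hrec]
      simp only [List.head?_cons, Option.elim, Option.isNone_some,
        Bool.false_or]
      by_cases hc : (t = "--node-labels" ∨ t = "--edge-labels") ∧
          (PySem.Chars.startswith r.toList ['-'] = true ∨ ∀ x ∈ rs', pvPos x = false)
      · simp [hc]
      · simp [hc]

-- the index?/slice split is the takeWhile/dropWhile split
lemma split_eq (argv : List String) :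
    PySem.List.slice argv none (some (((PySem.List.index? argv "--").getD argv.length : Nat) : Int))
        = argv.takeWhile (fun v => v != "--")
    ∧ PySem.List.slice argv (some (((PySem.List.index? argv "--").getD argv.length : Nat) : Int)) none
        = argv.dropWhile (fun v => v != "--") := by
  rw [PySem.List.slice_to_natCast, PySem.List.slice_from_natCast]
  induction argv with
  | nil => simp
  | cons x xs ih =>
    by_cases h : x = "--"
    · subst h
      rw [PySem.List.index?_cons_self]
      simp
    · rw [PySem.List.index?_cons_of_ne xs h]
      cases hix : PySem.List.index? xs "--" with
      | none =>
        rw [hix] at ih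
        simp only [Option.map_none, Option.getD_none, List.length_cons] at ih ⊢
        simp [List.take_succ_cons, List.drop_succ_cons, h, ih.1, ih.2]
      | some k =>
        rw [hix] at ih
        simp only [Option.map_some, Option.getD_some] at ih ⊢
        simp [List.take_succ_cons, List.drop_succ_cons, h, ih.1, ih.2]

-- ===== VERDICT (by name: the statement is the Claim_ definition above) =====
theorem normalize_label_args_py_spec : Claim_equal_normalize_label_args_py := by
  intro argv _
  unfold Spec_normalize_label_args_py
  rw [A_eq_G]
  show _ = normalize_label_args_py_alt argv
  rw [normalize_label_args_py_alt]
  simp only [(split_eq argv).1, (split_eq argv).2]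
  rw [pvFoldRev]
  exact (emit_eq_G _ _).symm
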